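-- pv_equiv track=rewrite | github.com/KeefeT/advent2025 | day2/solution.py | is_more_invalid
-- ===== SOURCE A (Python) =====
-- def is_more_invalid(num: int) -> bool:
--     string = str(num)
--     length = len(string)
--     #for every valid substring in string
--     for i in range(1,(length//2)+1): # == len substring
--         valid = False
--         sub = string[:i]
--         num_checks = length // i
--
--         if (length % i != 0):
--             #cant work
--             continue
--
--         # for every check of that substring for
--         for j in range(0,num_checks):
--             jsub = string[i*j:(i*j)+i]
--             if sub != jsub:
--                 valid = False
--                 break
--             else:
--                 valid = True
--
--         if valid == True:
--             return True
--
--     return False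
-- ===== SOURCE B (Python) =====
-- def is_more_invalid(num: int) -> bool:
--     s = str(num)
--     return s in (s + s)[1:-1]
-- ===== Notes on version B (the rewrite author's own statement) =====
-- stated objective: idiomatic
-- what changed: Replaced the nested divisor-length/block-comparison loops with the classic doubled-string periodicity test: s is a nontrivial repetition iff s occurs in (s+s)[1:-1], a single substring search.
import Mathlib
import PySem

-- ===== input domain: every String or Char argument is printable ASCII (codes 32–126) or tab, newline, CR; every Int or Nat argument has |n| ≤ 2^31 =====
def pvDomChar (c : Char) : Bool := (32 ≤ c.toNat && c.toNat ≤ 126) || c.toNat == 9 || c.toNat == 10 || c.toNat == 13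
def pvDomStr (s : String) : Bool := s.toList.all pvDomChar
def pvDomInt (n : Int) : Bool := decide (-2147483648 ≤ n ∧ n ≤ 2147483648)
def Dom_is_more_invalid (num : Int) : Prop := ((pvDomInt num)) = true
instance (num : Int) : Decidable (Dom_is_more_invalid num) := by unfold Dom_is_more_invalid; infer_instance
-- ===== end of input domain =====

-- B replaces A's nested divisor-length/block-comparison loops with the classic
-- doubled-string periodicity test `s in (s+s)[1:-1]` (idiomatic; same return value).

-- ===== PORT A =====
-- inner loop: `for j in range(0, num_checks): …` carrying `valid`; a mismatch is the break
def pvInnerA (string sub : List Char) (i : Int) : List Int → Bool → Bool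
  | [], valid => valid
  | j :: rest, _ =>
    let jsub := PySem.List.slice string (some (i * j)) (some (i * j + i))
    if sub ≠ jsub then false
    else pvInnerA string sub i rest true

-- outer loop: `for i in range(1, length//2 + 1): …` with the early `return True`
def pvOuterA (string : List Char) (length : Int) : List Int → Bool
  | [] => false
  | i :: rest =>
    let sub := PySem.List.slice string none (some i)
    let num_checks := PySem.Int.floordiv length i
    if PySem.Int.mod length i ≠ 0 then pvOuterA string length rest
    else if pvInnerA string sub i (PySem.List.pyRange 0 num_checks 1) false then true
    else pvOuterA string length rest

def is_more_invalid (num : Int) : Bool :=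
  let string := PySem.Int.toChars num
  let length : Int := (string.length : Int)
  pvOuterA string length (PySem.List.pyRange 1 (PySem.Int.floordiv length 2 + 1) 1)

-- ===== PORT B =====
def is_more_invalid_alt (num : Int) : Bool :=
  let s := PySem.Int.toChars num
  PySem.Chars.isIn s (PySem.List.slice (s ++ s) (some 1) (some (-1)))

-- ===== PRECONDITION & SPEC =====
def Spec_is_more_invalid (num : Int) (out : Bool) : Prop := out = is_more_invalid_alt num
instance (num : Int) (out : Bool) : Decidable (Spec_is_more_invalid num out) := by unfold Spec_is_more_invalid; infer_instance

-- ===== CLAIM (what is proved, stated in full; the proofs are below) =====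
def Claim_equal_is_more_invalid : Prop := ∀ (num : Int), Dom_is_more_invalid num → Spec_is_more_invalid num (is_more_invalid num)

-- ===== LEMMAS AND PROOFS =====

-- `str(num)` is never empty
theorem pv_toDigits_ne_nil (b m : ℕ) : Nat.toDigits b m ≠ [] := by
  unfold Nat.toDigits
  simp only [Nat.toDigitsCore]
  split
  · simp
  · intro hnil
    have hlen := Nat.toDigitsCore_lens_eq b m (m / b) (Nat.digitChar (m % b)) []
    rw [hnil] at hlen
    simp at hlen

theorem pv_toChars_ne_nil (num : Int) : PySem.Int.toChars num ≠ [] := by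
  unfold PySem.Int.toChars
  split
  · simp
  · exact pv_toDigits_ne_nil 10 num.toNat

-- pointwise periodicity: every character equals the one at its index mod i
def pvM (l : List Char) (i : ℕ) : Prop := ∀ idx, (h : idx < l.length) → l[idx] = l.getD (idx % i) 'x'

-- the inner loop succeeds iff every block equals the prefix
theorem pv_inner_iff (l sub : List Char) (i : Int) (js : List Int) (hjs : js ≠ []) (v : Bool) :
    pvInnerA l sub i js v = true ↔ ∀ j ∈ js, sub = PySem.List.slice l (some (i * j)) (some (i * j + i)) := by
  induction js generalizing v with
  | nil => exact absurd rfl hjs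
  | cons j rest ih =>
    simp only [pvInnerA]
    by_cases heq : sub = PySem.List.slice l (some (i * j)) (some (i * j + i))
    · rw [if_neg (by simp [heq])]
      cases rest with
      | nil => simp [pvInnerA, heq]
      | cons r rs =>
        rw [ih (by simp) true]
        constructor
        · intro hall j' hj'
          rcases List.mem_cons.mp hj' with h | h
          · rw [h]; exact heq
          · exact hall j' h
        · intro hall j' hj'
          exact hall j' (List.mem_cons_of_mem _ hj')
    · rw [if_pos (by simp [heq])]
      simp only [Bool.false_eq_true, false_iff]
      intro hall
      exact heq (hall j (List.mem_cons_self))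

-- the outer loop succeeds iff some candidate length passes both tests
theorem pv_outer_iff (l : List Char) (n : Int) (js : List Int) :
    pvOuterA l n js = true ↔ ∃ i ∈ js, PySem.Int.mod n i = 0 ∧
      pvInnerA l (PySem.List.slice l none (some i)) i
        (PySem.List.pyRange 0 (PySem.Int.floordiv n i) 1) false = true := by
  induction js with
  | nil => simp [pvOuterA]
  | cons i rest ih =>
    simp only [pvOuterA]
    by_cases hmod : PySem.Int.mod n i = 0
    · rw [if_neg (by simp [hmod])]
      by_cases hin : pvInnerA l (PySem.List.slice l none (some i)) i
          (PySem.List.pyRange 0 (PySem.Int.floordiv n i) 1) false = true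
      · rw [if_pos hin]
        simp only [true_iff]
        exact ⟨i, List.mem_cons_self, hmod, hin⟩
      · rw [if_neg hin, ih]
        constructor
        · rintro ⟨x, hx, h1, h2⟩
          exact ⟨x, List.mem_cons_of_mem _ hx, h1, h2⟩
        · rintro ⟨x, hx, h1, h2⟩
          rcases List.mem_cons.mp hx with h | h
          · subst h; exact absurd h2 hin
          · exact ⟨x, h, h1, h2⟩
    · rw [if_pos (by simp [hmod]), ih]
      constructor
      · rintro ⟨x, hx, h1, h2⟩
        exact ⟨x, List.mem_cons_of_mem _ hx, h1, h2⟩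
      · rintro ⟨x, hx, h1, h2⟩
        rcases List.mem_cons.mp hx with h | h
        · subst h; exact absurd h1 hmod
        · exact ⟨x, h, h1, h2⟩

-- A = true iff some block length 1 ≤ i ≤ n/2 divides n and all blocks equal the prefix
theorem pvA_iff (l : List Char) (hl : l ≠ []) :
    pvOuterA l (l.length : Int) (PySem.List.pyRange 1 (PySem.Int.floordiv (l.length : Int) 2 + 1) 1) = true
      ↔ ∃ i : ℕ, 1 ≤ i ∧ i ≤ l.length / 2 ∧ i ∣ l.length ∧
          ∀ j < l.length / i, (l.drop (i * j)).take i = l.take i := by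
  have hn : 0 < l.length := List.length_pos_iff.mpr hl
  have h2 : PySem.Int.floordiv (l.length : Int) 2 = ((l.length / 2 : ℕ) : Int) := by
    exact_mod_cast PySem.Int.floordiv_natCast l.length 2
  rw [pv_outer_iff]
  constructor
  · rintro ⟨I, hmem, hmod, hinner⟩
    rw [PySem.List.mem_pyRange_one] at hmem
    obtain ⟨hI1, hI2⟩ := hmem
    rw [h2] at hI2
    set i : ℕ := I.toNat with hidef
    have hIi : I = (i : Int) := by omega
    have hipos : 1 ≤ i := by omega
    have hihalf : i ≤ l.length / 2 := by omega
    have hdvd : i ∣ l.length := by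
      have := (PySem.Int.mod_eq_zero_iff_dvd (l.length : Int) I).mp hmod
      rw [hIi] at this
      exact_mod_cast this
    have hile : i ≤ l.length := Nat.le_of_dvd hn hdvd
    have hqpos : 0 < l.length / i := Nat.div_pos hile (by omega)
    have hfd : PySem.Int.floordiv (l.length : Int) I = ((l.length / i : ℕ) : Int) := by
      rw [hIi]; exact_mod_cast PySem.Int.floordiv_natCast l.length i
    rw [hfd] at hinner
    rw [pv_inner_iff l _ I _ (by
      apply List.ne_nil_of_length_pos
      rw [PySem.List.length_pyRange_one]
      omega) false] at hinner
    refine ⟨i, hipos, hihalf, hdvd, ?_⟩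
    intro j hj
    have hmemj : (j : Int) ∈ PySem.List.pyRange 0 ((l.length / i : ℕ) : Int) 1 := by
      rw [PySem.List.mem_pyRange_one]
      constructor
      · positivity
      · exact_mod_cast hj
    have := hinner (j : Int) hmemj
    rw [hIi] at this
    have hcast1 : ((i : Int) * (j : Int)) = ((i * j : ℕ) : Int) := by push_cast; ring
    have hcast2 : ((i : Int) * (j : Int) + (i : Int)) = (((i * j : ℕ) : Int) + ((i : ℕ) : Int)) := by push_cast; ring
    rw [hcast1, PySem.List.slice_natCast_add, PySem.List.slice_to_natCast] at this
    exact this.symm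
  · rintro ⟨i, hipos, hihalf, hdvd, hblk⟩
    have hile : i ≤ l.length := Nat.le_of_dvd hn hdvd
    have hqpos : 0 < l.length / i := Nat.div_pos hile (by omega)
    refine ⟨(i : Int), ?_, ?_, ?_⟩
    · rw [PySem.List.mem_pyRange_one, h2]
      constructor
      · exact_mod_cast hipos
      · have : (i : Int) ≤ ((l.length / 2 : ℕ) : Int) := by exact_mod_cast hihalf
        omega
    · rw [PySem.Int.mod_eq_zero_iff_dvd]
      exact_mod_cast hdvd
    · have hfd : PySem.Int.floordiv (l.length : Int) (i : Int) = ((l.length / i : ℕ) : Int) := by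
        exact_mod_cast PySem.Int.floordiv_natCast l.length i
      rw [hfd]
      rw [pv_inner_iff l _ _ _ (by
        apply List.ne_nil_of_length_pos
        rw [PySem.List.length_pyRange_one]
        omega) false]
      intro J hJ
      rw [PySem.List.mem_pyRange_one] at hJ
      set j : ℕ := J.toNat with hjdef
      have hJj : J = (j : Int) := by omega
      have hjlt : j < l.length / i := by omega
      have hcast1 : ((i : Int) * J) = ((i * j : ℕ) : Int) := by rw [hJj]; push_cast; ring
      rw [hcast1, PySem.List.slice_natCast_add, PySem.List.slice_to_natCast]
      exact (hblk j hjlt).symm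

-- blocks-equal-prefix ↔ pointwise periodicity
theorem pv_block_iff_M (l : List Char) (i : ℕ) (hi : 0 < i) (hd : i ∣ l.length) :
    (∀ j < l.length / i, (l.drop (i * j)).take i = l.take i) ↔ pvM l i := by
  have hile : i ∣ l.length := hd
  constructor
  · intro hblk idx h
    have hj : idx / i < l.length / i := Nat.div_lt_div_of_lt_of_dvd hd h
    have hb := hblk (idx / i) hj
    have hidx : i * (idx / i) + idx % i = idx := by
      have := Nat.div_add_mod idx i
      omega
    have ht : idx % i < i := Nat.mod_lt _ hi
    have hget := congrArg (fun xs => xs[idx % i]?) hb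
    simp only [List.getElem?_take, List.getElem?_drop, ht, if_pos] at hget
    rw [hidx] at hget
    have h2 : idx % i < l.length := by omega
    rw [List.getElem?_eq_getElem h, List.getElem?_eq_getElem h2] at hget
    rw [List.getD_eq_getElem l 'x' h2]
    exact Option.some_injective _ hget
  · intro hm j hj
    have hjile : i * j + i ≤ l.length := by
      have : j + 1 ≤ l.length / i := hj
      have h1 : i * (j + 1) ≤ i * (l.length / i) := Nat.mul_le_mul_left i this
      rw [Nat.mul_div_cancel' hd] at h1
      omega
    have hile2 : i ≤ l.length := by omega
    apply List.ext_getElem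
    · simp only [List.length_take, List.length_drop]
      omega
    · intro t h1 h2
      simp only [List.length_take, List.length_drop] at h1
      have hti : t < i := by omega
      have htl : i * j + t < l.length := by omega
      have htl2 : t < l.length := by omega
      simp only [List.getElem_take, List.getElem_drop]
      have e1 := hm (i * j + t) htl
      have e2 := hm t htl2
      have hmod1 : (i * j + t) % i = t % i := by
        rw [Nat.add_comm, Nat.add_mul_mod_self_left]
      rw [hmod1] at e1
      rw [e1, e2]

-- pointwise periodicity gives a fixed rotation
theorem pv_rot_of_M (l : List Char) (i : ℕ) (hd : i ∣ l.length) (hm : pvM l i) :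
    l.rotate i = l := by
  apply List.ext_getElem
  · simp
  · intro idx h1 h2
    rw [List.getElem_rotate]
    have hlt : (idx + i) % l.length < l.length := Nat.mod_lt _ (by omega)
    have e1 := hm ((idx + i) % l.length) hlt
    have e2 := hm idx h2
    rw [e1, e2]
    congr 1
    rw [Nat.mod_mod_of_dvd _ hd, Nat.add_mod_right]

-- a fixed rotation by a divisor gives pointwise periodicity
theorem pv_M_of_rot (l : List Char) (i : ℕ) (hi : 0 < i) (hr : l.rotate i = l) :
    pvM l i := by
  have haux : ∀ idx, (h : idx < l.length) → l[(idx + i) % l.length]'(Nat.mod_lt _ (by omega)) = l[idx] := by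
    intro idx h
    have h5 := List.getElem_rotate l i idx (by simpa using h)
    simp only [hr] at h5
    exact h5.symm
  intro idx
  induction idx using Nat.strong_induction_on with
  | _ idx ih =>
    intro h
    by_cases hcase : idx < i
    · rw [Nat.mod_eq_of_lt hcase, List.getD_eq_getElem l 'x' h]
    · rw [Nat.not_lt] at hcase
      have h1 : idx - i < l.length := by omega
      have h2 := haux (idx - i) h1
      have h3 : idx - i + i = idx := by omega
      simp only [h3, Nat.mod_eq_of_lt h] at h2
      have h4 := ih (idx - i) (by omega) h1
      rw [h2, h4]
      congr 1
      exact (Nat.mod_eq_sub_mod hcase).symm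

-- a fixed rotation by any 1 ≤ k < n gives one by gcd k n (subgroup argument)
theorem pv_rot_gcd (l : List Char) (k : ℕ) (hk : 0 < k) (hkn : k < l.length) (hr : l.rotate k = l) :
    l.rotate (Nat.gcd k l.length) = l := by
  have hpow : ∀ m : ℕ, l.rotate (k * m) = l := by
    intro m
    induction m with
    | zero => simp
    | succ m ih =>
      have : k * (m + 1) = k * m + k := by ring
      rw [this, ← List.rotate_rotate, ih, hr]
  have hglt : Nat.gcd k l.length < l.length := lt_of_le_of_lt (Nat.gcd_le_left _ hk) hkn
  obtain ⟨m, hmlt, hm⟩ := Nat.exists_mul_mod_eq_gcd (k := l.length) (n := k) hglt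
  have : l.rotate (k * m % l.length) = l := by
    rw [List.rotate_mod, hpow m]
  rw [hm] at this
  exact this

-- xs[1:-1] as drop/take
theorem pv_slice_one_negone (xs : List Char) (h : 2 ≤ xs.length) :
    PySem.List.slice xs (some 1) (some (-1)) = (xs.drop 1).take (xs.length - 2) := by
  have hc1 : PySem.List.clampIdx xs.length 1 = 1 := by
    simp only [PySem.List.clampIdx]
    split
    · omega
    · omega
  have hc2 : PySem.List.clampIdx xs.length (-1) = xs.length - 1 := by
    simp only [PySem.List.clampIdx]
    split
    · split <;> omega
    · omega
  simp only [PySem.List.slice]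
  rw [hc1, hc2]
  have e : xs.length - 1 - 1 = xs.length - 2 := by omega
  rw [e]

-- a length-n window of (l ++ l) at offset k ≤ n is the rotation by k
theorem pv_take_drop_double (l : List Char) (k : ℕ) (hk : k ≤ l.length) :
    ((l ++ l).drop k).take l.length = l.rotate k := by
  rw [List.drop_append]
  have h0 : k - l.length = 0 := by omega
  rw [h0, List.drop_zero, List.take_append]
  have h1 : List.take l.length (List.drop k l) = List.drop k l :=
    List.take_of_length_le (by simp)
  rw [h1]
  have h2 : l.length - (List.drop k l).length = k := by
    simp only [List.length_drop]
    omega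
  rw [h2, List.rotate_eq_drop_append_take hk]

-- B = true iff some rotation by 1 ≤ k < n fixes l
theorem pvB_iff (l : List Char) (hl : l ≠ []) :
    PySem.Chars.isIn l (PySem.List.slice (l ++ l) (some 1) (some (-1))) = true
      ↔ ∃ k : ℕ, 1 ≤ k ∧ k < l.length ∧ l.rotate k = l := by
  have hn : 0 < l.length := List.length_pos_iff.mpr hl
  have hT : PySem.List.slice (l ++ l) (some 1) (some (-1))
      = ((l ++ l).drop 1).take (2 * l.length - 2) := by
    rw [pv_slice_one_negone (l ++ l) (by simp; omega)]
    congr 1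
    simp
    omega
  rw [← PySem.Chars.exists_prefix_drop_iff_isIn, hT]
  constructor
  · rintro ⟨t, ht⟩
    have hlen := ht.length_le
    simp only [List.length_drop, List.length_take, List.length_append] at hlen
    have ht2 : t ≤ l.length - 2 := by omega
    have hn2 : 2 ≤ l.length := by omega
    rw [List.prefix_iff_eq_take, List.drop_take, List.drop_drop, List.take_take] at ht
    have hmin : min l.length (2 * l.length - 2 - t) = l.length := by omega
    rw [hmin] at ht
    have h1t : 1 + t = t + 1 := by omega
    rw [h1t, pv_take_drop_double l (t + 1) (by omega)] at ht
    exact ⟨t + 1, by omega, by omega, ht.symm⟩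
  · rintro ⟨k, hk1, hk2, hrot⟩
    refine ⟨k - 1, ?_⟩
    rw [List.prefix_iff_eq_take, List.drop_take, List.drop_drop, List.take_take]
    have hmin : min l.length (2 * l.length - 2 - (k - 1)) = l.length := by omega
    rw [hmin]
    have h1t : 1 + (k - 1) = k := by omega
    rw [h1t, pv_take_drop_double l k (by omega)]
    exact hrot.symm

-- ===== VERDICT (by name: the statement is the Claim_ definition above) =====
theorem is_more_invalid_spec : Claim_equal_is_more_invalid := by
  intro num _
  unfold Spec_is_more_invalid is_more_invalid is_more_invalid_alt
  set l := PySem.Int.toChars num with hldef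
  have hl : l ≠ [] := pv_toChars_ne_nil num
  have hA := pvA_iff l hl
  have hB := pvB_iff l hl
  by_cases hb : PySem.Chars.isIn l (PySem.List.slice (l ++ l) (some 1) (some (-1))) = true
  · -- B true: get a rotation, pass to gcd, show A true
    obtain ⟨k, hk1, hk2, hk3⟩ := hB.mp hb
    have hg : l.rotate (Nat.gcd k l.length) = l := pv_rot_gcd l k hk1 hk2 hk3
    have hgd : Nat.gcd k l.length ∣ l.length := Nat.gcd_dvd_right _ _
    have hgpos : 0 < Nat.gcd k l.length := Nat.gcd_pos_of_pos_left _ hk1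
    have hghalf : Nat.gcd k l.length ≤ l.length / 2 := by
      obtain ⟨m, hm⟩ := hgd
      have hgltn : Nat.gcd k l.length < l.length :=
        lt_of_le_of_lt (Nat.gcd_le_left _ hk1) hk2
      have hm2 : 2 ≤ m := by
        by_contra hcon
        have hm01 : m = 0 ∨ m = 1 := by omega
        rcases hm01 with h | h <;> subst h
        · rw [Nat.mul_zero] at hm; omega
        · rw [Nat.mul_one] at hm; omega
      have h2g : 2 * Nat.gcd k l.length ≤ l.length := by
        calc 2 * Nat.gcd k l.length = Nat.gcd k l.length * 2 := by ring
          _ ≤ Nat.gcd k l.length * m := Nat.mul_le_mul_left _ hm2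
          _ = l.length := hm.symm
      omega
    have := (pv_block_iff_M l _ hgpos hgd).mpr (pv_M_of_rot l _ hgpos hg)
    rw [hb, hA]
    exact ⟨_, hgpos, hghalf, hgd, this⟩
  · -- B false: A must be false too
    simp only [Bool.not_eq_true] at hb
    rw [hb]
    rw [Bool.eq_false_iff, Ne, hA]
    rintro ⟨i, hi1, hi2, hid, hblk⟩
    have hipos : 0 < i := hi1
    have hrot : l.rotate i = l :=
      pv_rot_of_M l i hid ((pv_block_iff_M l i hipos hid).mp hblk)
    have hin : i < l.length := by
      have : 0 < l.length := List.length_pos_iff.mpr hl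
      omega
    have : PySem.Chars.isIn l (PySem.List.slice (l ++ l) (some 1) (some (-1))) = true :=
      hB.mpr ⟨i, hi1, hin, hrot⟩
    rw [hb] at this
    exact absurd this (by simp)
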